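-- pv_equiv track=rewrite | github.com/CapKenway/dumbai | dumbai.py | _minimum_constraint
-- ===== SOURCE A (Python) =====
-- def _minimum_constraint(domains, starter = ''):
--     low_constraint = None
--     if starter != '':
--         yet_lowest = len(domains[starter])
--     else:
--         yet_lowest = len(domains[list(domains.keys())[0]])
--     for key, val in zip(list(domains.keys()), list(domains.values())):
--         if yet_lowest > len(val):
--             yet_lowest = len(val)
--             low_constraint = key
--     return low_constraint
--     pass
-- ===== SOURCE B (Python) =====
-- def _minimum_constraint(domains, starter=''):
--     if starter != '':
--         threshold = len(domains[starter])
--     else: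
--         threshold = len(domains[list(domains.keys())[0]])
--     lowest = min(len(v) for v in domains.values())
--     if lowest < threshold:
--         for key, val in domains.items():
--             if len(val) == lowest:
--                 return key
--     return None
-- ===== Notes on version B (the rewrite author's own statement) =====
-- stated objective: alternative
-- what changed: Replaces A's single fused running-min scan carrying (yet_lowest, low_constraint) state with a stateless min() over all value lengths followed by a separate first-match pass that returns the first key attaining that minimum when it is strictly below the seed threshold.
-- outside the precondition, e.g. on _minimum_constraint({}, ''): A raises IndexError, B raises IndexError
import Mathlib
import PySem

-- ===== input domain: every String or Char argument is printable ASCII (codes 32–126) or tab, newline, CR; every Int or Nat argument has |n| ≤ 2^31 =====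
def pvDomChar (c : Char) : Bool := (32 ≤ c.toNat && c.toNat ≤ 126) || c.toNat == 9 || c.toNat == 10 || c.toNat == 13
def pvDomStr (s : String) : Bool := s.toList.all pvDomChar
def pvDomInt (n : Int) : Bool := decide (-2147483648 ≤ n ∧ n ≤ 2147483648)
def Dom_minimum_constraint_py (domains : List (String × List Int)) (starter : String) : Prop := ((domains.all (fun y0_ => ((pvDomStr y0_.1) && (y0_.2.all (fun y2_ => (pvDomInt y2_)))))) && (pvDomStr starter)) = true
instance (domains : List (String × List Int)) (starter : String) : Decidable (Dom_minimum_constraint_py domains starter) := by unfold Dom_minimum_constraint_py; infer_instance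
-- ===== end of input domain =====

-- B replaces A's fused running-min scan with a min-first computation followed by a
-- separate first-match pass (same O(n) cost, different decomposition).


-- ===== PORT A =====
-- seed: len(domains[starter]) if starter != '' else len(domains[list(domains.keys())[0]]);
-- dict lookup = first match on the association list; none = the lookup/index raised (excluded by Pre_)
def pvSeed (domains : List (String × List Int)) (starter : String) : Option Int :=
  if starter ≠ "" then
    (domains.lookup starter).map (fun v => (v.length : Int))
  else
    (PySem.List.pyGet? (domains.map Prod.fst) 0).bind
      (fun k => (domains.lookup k).map (fun v => (v.length : Int)))

-- one iteration of A's loop body over the state (yet_lowest, low_constraint)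
def pvStepA (st : Int × Option String) (kv : String × List Int) : Int × Option String :=
  if (kv.2.length : Int) < st.1 then ((kv.2.length : Int), some kv.1) else st

def minimum_constraint_py (domains : List (String × List Int)) (starter : String) : Option String :=
  match pvSeed domains starter with
  | none => none
  | some y0 => (domains.foldl pvStepA (y0, none)).2

-- ===== PORT B =====
def minimum_constraint_py_alt (domains : List (String × List Int)) (starter : String) : Option String :=
  match pvSeed domains starter with
  | none => none
  | some threshold =>
    match PySem.List.min? (domains.map (fun kv => (kv.2.length : Int))) (fun y => y) with
    | none => none
    | some lowest =>
      if lowest < threshold then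
        (domains.find? (fun kv => (kv.2.length : Int) == lowest)).map Prod.fst
      else none

-- ===== PRECONDITION & SPEC =====
-- Pre_ excludes exactly the inputs on which Python A raises: empty domains with starter = ''
-- (IndexError on list(domains.keys())[0]) and a nonempty starter that is not a key (KeyError).
def Pre_minimum_constraint_py (domains : List (String × List Int)) (starter : String) : Prop :=
  (starter = "" → domains ≠ []) ∧ (starter ≠ "" → starter ∈ domains.map Prod.fst)
instance (domains : List (String × List Int)) (starter : String) : Decidable (Pre_minimum_constraint_py domains starter) := by unfold Pre_minimum_constraint_py; infer_instance

def pvWitness_minimum_constraint_py : (List (String × List Int)) × String :=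
  ([("a", [1, 2]), ("b", [7])], "")

def Spec_minimum_constraint_py (domains : List (String × List Int)) (starter : String) (out : Option String) : Prop := out = minimum_constraint_py_alt domains starter
instance (domains : List (String × List Int)) (starter : String) (out : Option String) : Decidable (Spec_minimum_constraint_py domains starter out) := by unfold Spec_minimum_constraint_py; infer_instance

-- ===== CLAIM (what is proved, stated in full; the proofs are below) =====
def Claim_equal_minimum_constraint_py : Prop := ∀ (domains : List (String × List Int)) (starter : String), Dom_minimum_constraint_py domains starter → Pre_minimum_constraint_py domains starter → Spec_minimum_constraint_py domains starter (minimum_constraint_py domains starter)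

-- ===== LEMMAS AND PROOFS =====

-- foldl min pulled through a cons
theorem pvFoldlMinCons (r : List Int) (a x : Int) :
    List.foldl min (min a x) r = min a (List.foldl min x r) := by
  induction r generalizing x with
  | nil => simp
  | cons y t ih =>
    simp only [List.foldl_cons]
    rw [min_assoc, ih]

-- A's fused loop = minimum-then-first-match, for any seed s and accumulator c
theorem pvFoldA_eq (l : List (String × List Int)) (s : Int) (c : Option String) :
    (l.foldl pvStepA (s, c)).2 =
      match PySem.List.min? (l.map (fun kv => (kv.2.length : Int))) (fun y => y) with
      | none => c
      | some m =>
        if m < s then (l.find? (fun kv => (kv.2.length : Int) == m)).map Prod.fst else c := by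
  induction l generalizing s c with
  | nil => simp [PySem.List.min?]
  | cons kv t ih =>
    simp only [List.foldl_cons, List.map_cons]
    rw [PySem.List.min?_id_cons]
    by_cases hs : (kv.2.length : Int) < s
    · rw [show pvStepA (s, c) kv = ((kv.2.length : Int), some kv.1) from by
        simp [pvStepA, hs]]
      cases t with
      | nil =>
        simp [hs, List.find?]
      | cons kv' t' =>
        have ih' := ih (kv.2.length : Int) (some kv.1)
        rw [List.map_cons, PySem.List.min?_id_cons] at ih'
        rw [ih']
        rw [List.map_cons, List.foldl_cons, pvFoldlMinCons]
        by_cases hlt : List.foldl min ((kv'.2.length : Int))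
            (t'.map (fun kv => (kv.2.length : Int))) < (kv.2.length : Int)
        · rw [min_eq_right hlt.le]
          have h1 : List.foldl min ((kv'.2.length : Int))
              (t'.map (fun kv => (kv.2.length : Int))) < s := lt_trans hlt hs
          have hne : ((kv.2.length : Int) ==
              List.foldl min ((kv'.2.length : Int)) (t'.map (fun kv => (kv.2.length : Int)))) = false := by
            simp only [beq_eq_false_iff_ne, ne_eq]
            omega
          simp [hlt, h1, List.find?, hne]
        · rw [min_eq_left (le_of_not_gt hlt)]
          simp [hlt, hs, List.find?]
    · rw [show pvStepA (s, c) kv = (s, c) from by simp [pvStepA, hs]]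
      cases t with
      | nil =>
        simp [hs]
      | cons kv' t' =>
        have ih' := ih s c
        rw [List.map_cons, PySem.List.min?_id_cons] at ih'
        rw [ih']
        rw [List.map_cons, List.foldl_cons, pvFoldlMinCons]
        by_cases hms : List.foldl min ((kv'.2.length : Int))
            (t'.map (fun kv => (kv.2.length : Int))) < s
        · have hma : List.foldl min ((kv'.2.length : Int))
              (t'.map (fun kv => (kv.2.length : Int))) < (kv.2.length : Int) := by omega
          rw [min_eq_right hma.le]
          have hne : ((kv.2.length : Int) ==
              List.foldl min ((kv'.2.length : Int)) (t'.map (fun kv => (kv.2.length : Int)))) = false := by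
            simp only [beq_eq_false_iff_ne, ne_eq]
            omega
          simp [hms, List.find?, hne]
        · have h1 : ¬ min (kv.2.length : Int)
              (List.foldl min ((kv'.2.length : Int)) (t'.map (fun kv => (kv.2.length : Int)))) < s := by
            omega
          simp [hms, h1]

-- ===== VERDICT (by name: the statement is the Claim_ definition above) =====
theorem minimum_constraint_py_spec : Claim_equal_minimum_constraint_py := by
  intro domains starter _ _
  unfold Spec_minimum_constraint_py minimum_constraint_py minimum_constraint_py_alt
  cases pvSeed domains starter with
  | none => rfl
  | some y0 =>
    simp only []
    rw [pvFoldA_eq]
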